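-- pv_equiv track=rewrite | github.com/sojaeheon/TIL | 100_algo_practice/4012_cooker/sol.py | food_value
-- ===== SOURCE A (Python) =====
-- def food_value(idx_list, S):
--     """idx_list에 든 재료들의 시너지 합 (i != j인 모든 순서쌍 합)"""
--     total = 0
--     L = len(idx_list)
--     for a in range(L):
--         i = idx_list[a]
--         for b in range(L):
--             j = idx_list[b]
--             if i != j:
--                 total += S[i][j]
--     return total
-- ===== SOURCE B (Python) =====
-- def food_value(idx_list, S):
--     """idx_list에 든 재료들의 시너지 합 (i != j인 모든 순서쌍 합)"""
--     cnt = {}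
--     for x in idx_list:
--         cnt[x] = cnt.get(x, 0) + 1
--     total = 0
--     for u, cu in cnt.items():
--         for v, cv in cnt.items():
--             if u != v:
--                 total += cu * cv * S[u][v]
--     return total
-- ===== Notes on version B (the rewrite author's own statement) =====
-- stated objective: faster
-- what changed: B aggregates idx_list into a value->multiplicity counter once and sums cu*cv*S[u][v] over pairs of DISTINCT values only, replacing A's O(n^2) scan over all index pairs by an O(n + k^2) scan over k distinct values.
import Mathlib
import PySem

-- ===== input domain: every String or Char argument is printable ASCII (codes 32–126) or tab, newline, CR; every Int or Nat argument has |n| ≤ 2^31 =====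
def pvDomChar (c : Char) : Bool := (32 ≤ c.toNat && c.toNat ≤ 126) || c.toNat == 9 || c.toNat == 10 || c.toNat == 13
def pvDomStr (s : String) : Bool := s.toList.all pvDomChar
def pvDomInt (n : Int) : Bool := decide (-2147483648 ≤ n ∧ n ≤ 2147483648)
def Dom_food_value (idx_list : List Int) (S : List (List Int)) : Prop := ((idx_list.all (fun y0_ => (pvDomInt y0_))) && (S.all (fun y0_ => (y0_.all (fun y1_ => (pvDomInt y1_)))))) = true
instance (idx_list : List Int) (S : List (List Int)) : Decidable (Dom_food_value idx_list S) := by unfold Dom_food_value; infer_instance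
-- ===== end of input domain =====

-- B tallies idx_list into a value→multiplicity counter once and sums cu*cv*S[u][v] over pairs of
-- DISTINCT values only: O(n + k²) over k distinct values instead of A's O(n²) scan over all index pairs.

-- ===== PORT A =====
-- pyGetD's default is never taken on admitted inputs: a, b range over range(L),
-- and Pre_ guarantees S[i][j] is in range for every pair of distinct values of idx_list.
def food_value (idx_list : List Int) (S : List (List Int)) : Int :=
  let L : Int := idx_list.length
  (PySem.List.pyRange 0 L 1).foldl (fun total a =>
    let i := PySem.List.pyGetD idx_list a 0
    (PySem.List.pyRange 0 L 1).foldl (fun total b =>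
      let j := PySem.List.pyGetD idx_list b 0
      if i ≠ j then total + PySem.List.pyGetD (PySem.List.pyGetD S i []) j 0 else total) total) 0

-- ===== PORT B =====
def food_value_alt (idx_list : List Int) (S : List (List Int)) : Int :=
  let cnt : PySem.Dict Int Int :=
    idx_list.foldl (fun d x => d.insert x (d.getD x 0 + 1)) PySem.Dict.empty
  cnt.items.foldl (fun total uc =>
    cnt.items.foldl (fun total vc =>
      if uc.1 ≠ vc.1 then
        total + uc.2 * vc.2 * PySem.List.pyGetD (PySem.List.pyGetD S uc.1 []) vc.1 0
      else total) total) 0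

-- ===== PRECONDITION & SPEC =====
-- Pre_ excludes exactly the inputs where Python A raises IndexError: some S[i][j] it reads
-- (i, j a pair of DISTINCT values of idx_list; Python's negative-index wraparound allowed) is out of range.
def Pre_food_value (idx_list : List Int) (S : List (List Int)) : Prop :=
  ∀ i ∈ idx_list, ∀ j ∈ idx_list, i ≠ j →
    ((PySem.List.pyGet? S i).bind (fun row => PySem.List.pyGet? row j)).isSome = true

instance (idx_list : List Int) (S : List (List Int)) : Decidable (Pre_food_value idx_list S) := by
  unfold Pre_food_value; infer_instance

def pvWitness_food_value : List Int × List (List Int) := ([0, 1, 1], [[0, 5], [7, 0]])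

def Spec_food_value (idx_list : List Int) (S : List (List Int)) (out : Int) : Prop := out = food_value_alt idx_list S
instance (idx_list : List Int) (S : List (List Int)) (out : Int) : Decidable (Spec_food_value idx_list S out) := by unfold Spec_food_value; infer_instance

-- ===== CLAIM (what is proved, stated in full; the proofs are below) =====
def Claim_equal_food_value : Prop := ∀ (idx_list : List Int) (S : List (List Int)), Dom_food_value idx_list S → Pre_food_value idx_list S → Spec_food_value idx_list S (food_value idx_list S)

-- ===== LEMMAS AND PROOFS =====

-- the matrix entry both programs add for a pair of distinct values
def pvS (S : List (List Int)) (i j : Int) : Int :=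
  PySem.List.pyGetD (PySem.List.pyGetD S i []) j 0

theorem foldl_add_sum {α : Type} (xs : List α) (g : α → Int) (t : Int) :
    xs.foldl (fun t x => t + g x) t = t + (xs.map g).sum := by
  induction xs generalizing t with
  | nil => simp
  | cons x xs ih => simp [ih]; ring

theorem foldl_ite_add {α : Type} (xs : List α) (p : α → Prop) [DecidablePred p]
    (g : α → Int) (t : Int) :
    xs.foldl (fun t x => if p x then t + g x else t) t
      = t + (xs.map (fun x => if p x then g x else 0)).sum := by
  have h : (fun (t : Int) x => if p x then t + g x else t)
      = (fun (t : Int) x => t + (if p x then g x else 0)) := by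
    funext t x; split <;> simp
  rw [h, foldl_add_sum]

theorem toFinset_dedup (xs : List Int) :
    (PySem.List.dedup xs).toFinset = xs.toFinset := by
  ext u; simp

-- a sum over a list is the multiplicity-weighted sum over its distinct values
theorem sum_map_eq_weighted_dedup (xs : List Int) (h : Int → Int) :
    (xs.map h).sum
      = ((PySem.List.dedup xs).map (fun u => (xs.count u : Int) * h u)).sum := by
  rw [Finset.sum_list_map_count]
  rw [← List.sum_toFinset _ (PySem.List.nodup_dedup xs), toFinset_dedup]
  apply Finset.sum_congr rfl
  intro u _
  simp

-- A is the plain double sum over idx_list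
theorem food_value_eq_double_sum (idx_list : List Int) (S : List (List Int)) :
    food_value idx_list S
      = (idx_list.map (fun i =>
          (idx_list.map (fun j => if i ≠ j then pvS S i j else 0)).sum)).sum := by
  unfold food_value
  rw [PySem.List.foldl_pyRange_zero_pyGetD' idx_list 0
    (fun total i => (PySem.List.pyRange 0 (idx_list.length : Int) 1).foldl
      (fun total b => if i ≠ PySem.List.pyGetD idx_list b 0 then
        total + PySem.List.pyGetD (PySem.List.pyGetD S i []) (PySem.List.pyGetD idx_list b 0) 0
      else total) total) 0]
  have hbody : (fun (total : Int) i => (PySem.List.pyRange 0 (idx_list.length : Int) 1).foldl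
      (fun total b => if i ≠ PySem.List.pyGetD idx_list b 0 then
        total + PySem.List.pyGetD (PySem.List.pyGetD S i []) (PySem.List.pyGetD idx_list b 0) 0
      else total) total)
      = (fun (total : Int) i =>
          total + (idx_list.map (fun j => if i ≠ j then pvS S i j else 0)).sum) := by
    funext total i
    rw [PySem.List.foldl_pyRange_zero_pyGetD' idx_list 0
      (fun total j => if i ≠ j then
        total + PySem.List.pyGetD (PySem.List.pyGetD S i []) j 0 else total) total]
    rw [foldl_ite_add idx_list (fun j => i ≠ j)
      (fun j => PySem.List.pyGetD (PySem.List.pyGetD S i []) j 0) total]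
    simp only [pvS]
  rw [hbody, foldl_add_sum]
  simp

-- B is the multiplicity-weighted double sum over the distinct values
theorem food_value_alt_eq (idx_list : List Int) (S : List (List Int)) :
    food_value_alt idx_list S
      = ((PySem.List.dedup idx_list).map (fun u =>
          ((PySem.List.dedup idx_list).map (fun v =>
            if u ≠ v then (idx_list.count u : Int) * ((idx_list.count v : Int) * pvS S u v) else 0)).sum)).sum := by
  unfold food_value_alt
  rw [PySem.Dict.foldl_insert_getD_add_one_eq_counter]
  dsimp only
  rw [PySem.Dict.items_counter]
  rw [List.foldl_map]
  dsimp only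
  have hbody : ∀ (total u : Int),
      (((PySem.Set.ofList idx_list).map fun k => (k, (idx_list.count k : Int))).foldl
        (fun total vc => if u ≠ vc.1 then
          total + (idx_list.count u : Int) * vc.2 * PySem.List.pyGetD (PySem.List.pyGetD S u []) vc.1 0
        else total) total)
      = total + ((PySem.List.dedup idx_list).map (fun v =>
            if u ≠ v then (idx_list.count u : Int) * ((idx_list.count v : Int) * pvS S u v) else 0)).sum := by
    intro total u
    rw [List.foldl_map]
    dsimp only
    rw [foldl_ite_add (PySem.Set.ofList idx_list) (fun v => u ≠ v)
      (fun v => (idx_list.count u : Int) * (idx_list.count v : Int) *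
        PySem.List.pyGetD (PySem.List.pyGetD S u []) v 0) total]
    simp [pvS, mul_assoc]
  have hfun : (fun (total u : Int) =>
      (((PySem.Set.ofList idx_list).map fun k => (k, (idx_list.count k : Int))).foldl
        (fun total vc => if u ≠ vc.1 then
          total + (idx_list.count u : Int) * vc.2 * PySem.List.pyGetD (PySem.List.pyGetD S u []) vc.1 0
        else total) total))
      = (fun (total u : Int) => total + ((PySem.List.dedup idx_list).map (fun v =>
            if u ≠ v then (idx_list.count u : Int) * ((idx_list.count v : Int) * pvS S u v) else 0)).sum) :=
    funext fun total => funext fun u => hbody total u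
  rw [hfun, foldl_add_sum]
  simp

-- the two sums coincide: fold the multiplicities into the double sum (twice)
theorem pv_bridge (idx_list : List Int) (S : List (List Int)) :
    (idx_list.map (fun i =>
        (idx_list.map (fun j => if i ≠ j then pvS S i j else 0)).sum)).sum
    = ((PySem.List.dedup idx_list).map (fun u =>
        ((PySem.List.dedup idx_list).map (fun v =>
          if u ≠ v then (idx_list.count u : Int) * ((idx_list.count v : Int) * pvS S u v) else 0)).sum)).sum := by
  rw [sum_map_eq_weighted_dedup idx_list
    (fun i => (idx_list.map (fun j => if i ≠ j then pvS S i j else 0)).sum)]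
  apply congrArg List.sum
  apply List.map_congr_left
  intro u _
  rw [sum_map_eq_weighted_dedup idx_list (fun j => if u ≠ j then pvS S u j else 0)]
  rw [← List.sum_map_mul_left]
  apply congrArg List.sum
  apply List.map_congr_left
  intro v _
  split <;> ring

-- ===== VERDICT (by name: the statement is the Claim_ definition above) =====
theorem food_value_spec : Claim_equal_food_value := by
  intro idx_list S _ _
  unfold Spec_food_value
  rw [food_value_eq_double_sum, food_value_alt_eq, pv_bridge]
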